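-- pv_equiv track=rewrite | github.com/pypi-data/pypi-mirror-400 | packages/abdwp/abdwp-0.5.5-py3-none-any.whl/abdwp/plotting.py | _normalize_kwargs
-- ===== SOURCE A (Python) =====
-- def _normalize_kwargs(kw, alias_mapping):
--     """
--     Normalize keyword arguments by converting aliases to canonical names.
--
--     Raises TypeError if both an alias and its canonical name are provided.
--     """
--     if kw is None:
--         return {}
--
--     # build reverse mapping: alias -> canonical
--     to_canonical = {}
--     for canonical, aliases in alias_mapping.items():
--         for alias in aliases:
--             to_canonical[alias] = canonical
--
--     out = {}
--     seen_canonical = {}  # tracks which canonical key was set by which kwarg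
--
--     for key, value in kw.items():
--         canonical = to_canonical.get(key, key)
--         if canonical in seen_canonical:
--             raise TypeError(
--                 f"got multiple values for argument '{canonical}' "
--                 f"(from '{seen_canonical[canonical]}' and '{key}')"
--             )
--         out[canonical] = value
--         seen_canonical[canonical] = key
--
--     return out
-- ===== SOURCE B (Python) =====
-- def _normalize_kwargs(kw, alias_mapping):
--     """
--     Normalize keyword arguments by converting aliases to canonical names.
--
--     Raises TypeError if both an alias and its canonical name are provided.
--     """
--     if kw is None:
--         return {}
--
--     to_canonical = {alias: canonical
--                     for canonical, aliases in alias_mapping.items()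
--                     for alias in aliases}
--     canonicals = [to_canonical.get(key, key) for key in kw]
--
--     if len(set(canonicals)) != len(canonicals):
--         _raise_clash(list(kw), canonicals)
--
--     return dict(zip(canonicals, kw.values()))
--
--
-- def _raise_clash(keys, canonicals):
--     for j, canonical in enumerate(canonicals):
--         i = canonicals.index(canonical)
--         if i != j:
--             raise TypeError(
--                 f"got multiple values for argument '{canonical}' "
--                 f"(from '{keys[i]}' and '{keys[j]}')"
--             )
-- ===== Notes on version B (the rewrite author's own statement) =====
-- stated objective: idiomatic
-- what changed: B replaces A's stateful single loop (reverse index consulted while incrementally maintaining out and seen dicts with a per-key duplicate check) by a staged comprehension pipeline: build the alias dict comprehension, map all keys to a canonicals list, detect duplicates once by comparing len(set(canonicals)) with len(canonicals), and return dict(zip(canonicals, kw.values())); Pre_ excludes the inputs where both raise TypeError (two kwargs resolving to one canonical name).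
import Mathlib
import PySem

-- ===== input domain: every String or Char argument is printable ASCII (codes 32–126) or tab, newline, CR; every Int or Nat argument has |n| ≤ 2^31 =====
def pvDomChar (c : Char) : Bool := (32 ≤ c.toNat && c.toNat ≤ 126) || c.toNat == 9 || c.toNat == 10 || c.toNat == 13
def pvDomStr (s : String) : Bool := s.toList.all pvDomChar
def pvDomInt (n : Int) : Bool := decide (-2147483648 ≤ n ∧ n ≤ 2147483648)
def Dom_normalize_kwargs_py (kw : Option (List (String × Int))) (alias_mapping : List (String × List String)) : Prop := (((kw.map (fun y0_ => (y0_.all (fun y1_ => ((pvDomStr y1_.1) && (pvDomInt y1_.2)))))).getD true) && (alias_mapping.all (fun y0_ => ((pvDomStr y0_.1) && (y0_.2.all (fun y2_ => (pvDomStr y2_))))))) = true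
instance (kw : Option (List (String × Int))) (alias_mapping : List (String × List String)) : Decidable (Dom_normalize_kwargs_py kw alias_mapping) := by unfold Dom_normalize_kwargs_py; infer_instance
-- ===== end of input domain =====

-- B replaces A's stateful single loop (reverse index + out/seen dicts updated per kwarg)
-- with a staged pipeline: map every key to its canonical name, one global set-cardinality
-- duplicate check, then dict(zip(...)); alternative decomposition, same results.

-- ===== PORT A =====
-- A's loop over kw maintaining out/seen dicts; on the duplicate branch Python raises
-- TypeError — excluded by Pre_, the port returns the dict built so far there.
def aLoop (to_canonical : PySem.Dict String String) :
    List (String × Int) → PySem.Dict String Int → PySem.Dict String String → PySem.Dict String Int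
  | [], out, _ => out
  | (key, value) :: rest, out, seen =>
    let canonical := to_canonical.getD key key
    if seen.contains canonical then out   -- raise TypeError (outside Pre_)
    else aLoop to_canonical rest (out.insert canonical value) (seen.insert canonical key)

def normalize_kwargs_py (kw : Option (List (String × Int))) (alias_mapping : List (String × List String)) : List (String × Int) :=
  match kw with
  | none => []
  | some kwl =>
    -- build reverse mapping: alias -> canonical
    let to_canonical : PySem.Dict String String :=
      (PySem.Dict.ofList alias_mapping).items.foldl
        (fun d p => p.2.foldl (fun d al => d.insert al p.1) d) PySem.Dict.empty
    (aLoop to_canonical (PySem.Dict.ofList kwl).items PySem.Dict.empty PySem.Dict.empty).items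

-- ===== PORT B =====
-- the dict comprehension {alias: canonical for canonical, aliases in alias_mapping.items() for alias in aliases}
def toCanonical (alias_mapping : List (String × List String)) : PySem.Dict String String :=
  PySem.Dict.ofList ((PySem.Dict.ofList alias_mapping).items.flatMap fun p => p.2.map fun a => (a, p.1))

-- the list comprehension [to_canonical.get(key, key) for key in kw]
def canonicalsOf (alias_mapping : List (String × List String)) (keys : List String) : List String :=
  keys.map fun k => (toCanonical alias_mapping).getD k k

def normalize_kwargs_py_alt (kw : Option (List (String × Int))) (alias_mapping : List (String × List String)) : List (String × Int) :=
  match kw with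
  | none => []
  | some kwl =>
    let items := (PySem.Dict.ofList kwl).items
    let canonicals := canonicalsOf alias_mapping (items.map Prod.fst)
    if (PySem.Set.ofList canonicals).length = canonicals.length then
      (PySem.Dict.ofList (canonicals.zip (items.map Prod.snd))).items
    else []   -- _raise_clash raises TypeError (outside Pre_)

-- ===== PRECONDITION & SPEC =====
-- Pre_ excludes exactly the inputs where the Python raises TypeError: two kwargs
-- (after dict collapse) resolving to the same canonical name.
def Pre_normalize_kwargs_py (kw : Option (List (String × Int))) (alias_mapping : List (String × List String)) : Prop :=
  (canonicalsOf alias_mapping ((PySem.Dict.ofList (kw.getD [])).keys)).Nodup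

instance (kw : Option (List (String × Int))) (alias_mapping : List (String × List String)) : Decidable (Pre_normalize_kwargs_py kw alias_mapping) := by unfold Pre_normalize_kwargs_py; infer_instance

def pvWitness_normalize_kwargs_py : (Option (List (String × Int))) × (List (String × List String)) :=
  (some [("a", 1), ("b", 2)], [("x", ["a"]), ("y", ["c"])])

def Spec_normalize_kwargs_py (kw : Option (List (String × Int))) (alias_mapping : List (String × List String)) (out : List (String × Int)) : Prop := out = normalize_kwargs_py_alt kw alias_mapping
instance (kw : Option (List (String × Int))) (alias_mapping : List (String × List String)) (out : List (String × Int)) : Decidable (Spec_normalize_kwargs_py kw alias_mapping out) := by unfold Spec_normalize_kwargs_py; infer_instance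

-- ===== CLAIM =====
def Claim_equal_normalize_kwargs_py : Prop := ∀ (kw : Option (List (String × Int))) (alias_mapping : List (String × List String)), Dom_normalize_kwargs_py kw alias_mapping → Pre_normalize_kwargs_py kw alias_mapping → Spec_normalize_kwargs_py kw alias_mapping (normalize_kwargs_py kw alias_mapping)

-- ===== LEMMAS AND PROOFS =====

-- A's reverse-index double loop builds exactly B's comprehension dict
theorem tc_eq (alias_mapping : List (String × List String)) :
    (PySem.Dict.ofList alias_mapping).items.foldl
        (fun d p => p.2.foldl (fun d al => d.insert al p.1) d) PySem.Dict.empty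
      = toCanonical alias_mapping := by
  show _ = ((PySem.Dict.ofList alias_mapping).items.flatMap fun p => p.2.map fun a => (a, p.1)).foldl
      (fun d q => d.insert q.1 q.2) PySem.Dict.empty
  rw [List.foldl_flatMap]
  simp [List.foldl_map]

-- A's loop over kwargs whose canonicals are pairwise distinct and fresh: no raise branch
-- is hit, and the out dict accumulates (canonical, value) pairs in order.
theorem aLoop_items (tc : PySem.Dict String String) (L : List (String × Int))
    (out : PySem.Dict String Int) (seen : PySem.Dict String String)
    (hnd : (L.map fun p => tc.getD p.1 p.1).Nodup)
    (hseen : ∀ p ∈ L, seen.contains (tc.getD p.1 p.1) = false)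
    (hout : ∀ p ∈ L, out.contains (tc.getD p.1 p.1) = false) :
    (aLoop tc L out seen).items = out.items ++ L.map (fun p => (tc.getD p.1 p.1, p.2)) := by
  induction L generalizing out seen with
  | nil => simp [aLoop]
  | cons kv rest ih =>
    obtain ⟨key, value⟩ := kv
    simp only [List.map_cons, List.nodup_cons, List.mem_map] at hnd
    have hc : seen.contains (tc.getD key key) = false := hseen (key, value) (by simp)
    have hne : ∀ p ∈ rest, tc.getD p.1 p.1 ≠ tc.getD key key := by
      intro p hp h
      exact hnd.1 ⟨p, hp, h⟩
    have hs' : ∀ p ∈ rest,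
        (seen.insert (tc.getD key key) key).contains (tc.getD p.1 p.1) = false := by
      intro p hp
      rw [PySem.Dict.contains_insert]
      simp [hne p hp, hseen p (List.mem_cons_of_mem _ hp)]
    have ho' : ∀ p ∈ rest,
        (out.insert (tc.getD key key) value).contains (tc.getD p.1 p.1) = false := by
      intro p hp
      rw [PySem.Dict.contains_insert]
      simp [hne p hp, hout p (List.mem_cons_of_mem _ hp)]
    have hrec := ih (out.insert (tc.getD key key) value)
      (seen.insert (tc.getD key key) key) hnd.2 hs' ho'
    have hins : (out.insert (tc.getD key key) value).items
        = out.items ++ [(tc.getD key key, value)] := by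
      rw [PySem.Dict.items_insert, hout (key, value) (by simp)]
      simp
    simp only [aLoop, hc, Bool.false_eq_true, if_false, hrec, hins]
    simp

-- dict(pairs) with pairwise-distinct keys lists exactly those pairs
theorem ofList_items_of_nodup_fst (L : List (String × Int)) (h : (L.map Prod.fst).Nodup) :
    (PySem.Dict.ofList L).items = L := by
  have := PySem.Dict.items_foldl_insert_fresh (l := L) (k := Prod.fst) (v := Prod.snd)
    (d := PySem.Dict.empty) (by simp [PySem.Dict.contains_empty]) h
  simpa using this

-- ===== VERDICT =====
theorem normalize_kwargs_py_spec : Claim_equal_normalize_kwargs_py := by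
  intro kw alias_mapping _ hpre
  unfold Spec_normalize_kwargs_py normalize_kwargs_py normalize_kwargs_py_alt
  cases kw with
  | none => rfl
  | some kwl =>
    simp only []
    set items := (PySem.Dict.ofList kwl).items with hitems
    have hkeys : (PySem.Dict.ofList kwl).keys = items.map Prod.fst := rfl
    unfold Pre_normalize_kwargs_py at hpre
    simp only [Option.getD_some, hkeys] at hpre
    have hcs : canonicalsOf alias_mapping (items.map Prod.fst)
        = items.map (fun p => (toCanonical alias_mapping).getD p.1 p.1) := by
      simp [canonicalsOf, List.map_map, Function.comp_def]
    have hnd : (items.map fun p => (toCanonical alias_mapping).getD p.1 p.1).Nodup := by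
      rw [← hcs]; exact hpre
    -- A side
    rw [tc_eq, aLoop_items _ _ _ _ hnd
      (by intro p _; simp [PySem.Dict.contains_empty])
      (by intro p _; simp [PySem.Dict.contains_empty])]
    -- B side
    have hlen : (PySem.Set.ofList (canonicalsOf alias_mapping (items.map Prod.fst))).length
        = (canonicalsOf alias_mapping (items.map Prod.fst)).length := by
      rw [PySem.Set.ofList_eq_self_of_nodup _ hpre]
    rw [if_pos hlen]
    have hzip : (canonicalsOf alias_mapping (items.map Prod.fst)).zip (items.map Prod.snd)
        = items.map (fun p => ((toCanonical alias_mapping).getD p.1 p.1, p.2)) := by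
      rw [hcs]
      exact List.zip_map'
    rw [hzip, ofList_items_of_nodup_fst _ (by simpa [List.map_map, Function.comp_def] using hnd)]
    simp [show PySem.Dict.empty.items = ([] : List (String × Int)) from rfl]
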